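-- pv_equiv track=rewrite | github.com/SoumyaMishra03/Conversql | base_tokenizers_for_all_datasets/astronauts_tokenizer.py | combine_schema_tokens
-- ===== SOURCE A (Python) =====
-- schema_phrases = [
--     # Table names
--     "personal info",
--     "mission info",
--     "mission performance",
--
--     # Shared column
--     "id",
--
--     # personal_info
--     "number",
--     "nationwide number",
--     "name",
--     "original name",
--     "sex",
--     "year of birth",
--     "nationality",
--     "military civilian",
--
--     # mission_info
--     "selection",
--     "year of selection",
--     "mission number",
--     "total number of missions",
--     "occupation",
--     "year of mission",
--     "mission title",
--
--     # mission_performance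
--     "ascend shuttle",
--     "in orbit",
--     "descend shuttle",
--     "hours mission",
--     "total hrs sum",
--     "field21",
--     "eva hrs mission",
--     "total eva hrs"
-- ]
--
-- def combine_schema_tokens(tokens):
--     combined_tokens = []
--     i = 0
--     max_phrase_length = 5
--     while i < len(tokens):
--         match_found = False
--         for j in range(max_phrase_length, 0, -1):
--             if i + j <= len(tokens):
--                 phrase = " ".join(tokens[i:i+j])
--                 if phrase in schema_phrases:
--                     combined_tokens.append(phrase)
--                     i += j
--                     match_found = True
--                     break
--         if not match_found:
--             combined_tokens.append(tokens[i])
--             i += 1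
--     return combined_tokens
-- ===== SOURCE B (Python) =====
-- schema_phrases = [
--     "personal info", "mission info", "mission performance",
--     "id",
--     "number", "nationwide number", "name", "original name", "sex",
--     "year of birth", "nationality", "military civilian",
--     "selection", "year of selection", "mission number",
--     "total number of missions", "occupation", "year of mission",
--     "mission title",
--     "ascend shuttle", "in orbit", "descend shuttle", "hours mission",
--     "total hrs sum", "field21", "eva hrs mission", "total eva hrs",
-- ]
--
-- def _build_trie():
--     # character trie of every schema phrase; key 0 marks "path so far is a complete phrase"
--     root = {}
--     for p in schema_phrases:
--         node = root
--         for c in p: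
--             node = node.setdefault(c, {})
--         node[0] = True
--     return root
--
-- _TRIE = _build_trie()
--
-- def combine_schema_tokens(tokens):
--     combined = []
--     i, n = 0, len(tokens)
--     while i < n:
--         node = _TRIE
--         best = 0
--         j = i
--         while j < n:
--             if j > i:
--                 node = node.get(" ")
--                 if node is None:
--                     break
--             ok = True
--             for c in tokens[j]:
--                 node = node.get(c)
--                 if node is None:
--                     ok = False
--                     break
--             if not ok:
--                 break
--             j += 1
--             if node.get(0):
--                 best = j - i
--         if best:
--             combined.append(" ".join(tokens[i:i + best]))
--             i += best
--         else:
--             combined.append(tokens[i])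
--             i += 1
--     return combined
-- ===== Notes on version B (the rewrite author's own statement) =====
-- stated objective: faster
-- what changed: A re-joins each candidate window (lengths 5..1) and tests membership in a 27-phrase list at every position; B builds a character trie of the phrases once and makes a single forward walk per position, feeding token characters (with a space edge between tokens) and remembering the deepest complete-phrase node, so no candidate strings are built and no phrase list is scanned.
import Mathlib
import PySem

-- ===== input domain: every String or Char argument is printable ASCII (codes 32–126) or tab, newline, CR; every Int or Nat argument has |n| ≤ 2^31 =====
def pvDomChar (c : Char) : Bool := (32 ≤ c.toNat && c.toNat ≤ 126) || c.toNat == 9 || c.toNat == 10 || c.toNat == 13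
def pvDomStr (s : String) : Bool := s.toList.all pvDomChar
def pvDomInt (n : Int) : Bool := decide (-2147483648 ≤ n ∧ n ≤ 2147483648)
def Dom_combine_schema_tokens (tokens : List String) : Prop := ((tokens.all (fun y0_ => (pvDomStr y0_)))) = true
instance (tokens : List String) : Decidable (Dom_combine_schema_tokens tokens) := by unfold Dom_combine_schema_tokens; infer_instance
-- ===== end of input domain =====

-- B replaces A's per-position rebuild-and-rescan (join each window of length 5..1, test it against a
-- 27-phrase list) by a character trie of the phrases built once and walked forward once per position;
-- same greedy longest-match result (objective: faster, measured).

-- ===== PORT A =====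
def schema_phrases : List String := [
  "personal info", "mission info", "mission performance",
  "id",
  "number", "nationwide number", "name", "original name", "sex",
  "year of birth", "nationality", "military civilian",
  "selection", "year of selection", "mission number",
  "total number of missions", "occupation", "year of mission",
  "mission title",
  "ascend shuttle", "in orbit", "descend shuttle", "hours mission",
  "total hrs sum", "field21", "eva hrs mission", "total eva hrs"]

-- A's inner 'for j in range(5, 0, -1)': first (largest) j with i+j ≤ len and the joined slice a phrase
def tryDesc (tokens : List String) (i : Nat) : Nat → Option (String × Nat)
  | 0 => none
  | j + 1 =>
    if i + (j + 1) ≤ tokens.length then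
      let phrase := PySem.Str.join " " (PySem.List.slice tokens (some (i : Int)) (some ((i : Int) + ((j : Int) + 1))))
      if phrase ∈ schema_phrases then some (phrase, j + 1) else tryDesc tokens i j
    else tryDesc tokens i j

-- termination helper for goA (cited by name in its decreasing_by)
theorem tryDesc_pos (tokens : List String) (i : Nat) :
    ∀ j p k, tryDesc tokens i j = some (p, k) → 0 < k := by
  intro j
  induction j with
  | zero => intro p k h; simp [tryDesc] at h
  | succ j ih =>
    intro p k h
    simp only [tryDesc] at h
    split at h
    · split at h
      · simp at h; omega
      · exact ih p k h
    · exact ih p k h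

-- A's outer while loop over the index i
def goA (tokens : List String) (i : Nat) : List String :=
  if h : i < tokens.length then
    match hm : tryDesc tokens i 5 with
    | some (p, j) => p :: goA tokens (i + j)
    | none => PySem.List.pyGetD tokens (i : Int) "" :: goA tokens (i + 1)
  else []
termination_by tokens.length - i
decreasing_by
  · have := tryDesc_pos tokens i 5 p j hm; omega
  · omega

def combine_schema_tokens (tokens : List String) : List String := goA tokens 0

-- ===== PORT B =====
-- the Python nested-dict trie, in first-child/next-sibling form: 'node c term child sib' is the
-- dict entry for character c (term = the 0-key marker), 'sib' the remaining entries of the same dict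
inductive Trie where
  | nil : Trie
  | node : Char → Bool → Trie → Trie → Trie
deriving DecidableEq, Repr

-- node.get(c) on a dict (= sibling chain): the (marker, children) of the entry for c
def findT : Trie → Char → Option (Bool × Trie)
  | .nil, _ => none
  | .node c' b child sib, c => if c' = c then some (b, child) else findT sib c

-- one phrase inserted along its characters; the final node gets the 0-key marker (node[0] = True)
def insT : Trie → List Char → Trie
  | ch, [] => ch
  | .nil, c :: cs => .node c cs.isEmpty (insT .nil cs) .nil
  | .node c' b child sib, c :: cs =>
    if c' = c then
      (if cs.isEmpty then .node c' true child sib else .node c' b (insT child cs) sib)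
    else .node c' b child (insT sib (c :: cs))
termination_by ch cs => (cs.length, sizeOf ch)

-- _TRIE = _build_trie()
def buildTrie : Trie := schema_phrases.foldl (fun t p => insT t p.toList) .nil

-- follow a character path from a (marker, children) state; none = node became None
def walkT : (Bool × Trie) → List Char → Option (Bool × Trie)
  | st, [] => some st
  | st, c :: cs =>
    match findT st.2 c with
    | none => none
    | some st' => walkT st' cs

-- the characters one iteration of B's inner loop consumes: the space edge (when j > i) then the token
def stepChars (k : Nat) (tok : String) : List Char :=
  (if k = 0 then [] else [' ']) ++ tok.toList

-- B's inner while loop: consume tokens while the trie node survives, remember the deepest marked node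
def scanB (st : Bool × Trie) (rem : List String) (k : Nat) (best : Nat) : Nat :=
  match rem with
  | [] => best
  | tok :: rest =>
    match walkT st (stepChars k tok) with
    | none => best
    | some st' => scanB st' rest (k + 1) (if st'.1 then k + 1 else best)

-- termination helper for goB (cited by name in its decreasing_by)
theorem scanB_le (rem : List String) : ∀ st k best, scanB st rem k best ≤ max best (k + rem.length) := by
  induction rem with
  | nil => intro st k best; simp [scanB]
  | cons tok rest ih =>
    intro st k best
    simp only [scanB]
    cases walkT st (stepChars k tok) with
    | none => exact Nat.le_max_left _ _
    | some st' =>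
      have := ih st' (k + 1) (if st'.1 then k + 1 else best)
      simp only [List.length_cons]
      cases hb : st'.1 <;> simp only [hb] at this ⊢ <;> simp at this ⊢ <;> omega

-- B's outer while loop
def goB (tokens : List String) (i : Nat) : List String :=
  if h : i < tokens.length then
    let best := scanB (false, buildTrie) (tokens.drop i) 0 0
    if hb : best = 0 then
      PySem.List.pyGetD tokens (i : Int) "" :: goB tokens (i + 1)
    else
      PySem.Str.join " " (PySem.List.slice tokens (some (i : Int)) (some ((i : Int) + (best : Int)))) ::
        goB tokens (i + best)
  else []
termination_by tokens.length - i
decreasing_by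
  · omega
  · have hle := scanB_le (tokens.drop i) (false, buildTrie) 0 0
    simp only [List.length_drop, Nat.zero_add, Nat.max_eq_right (Nat.zero_le _)] at hle
    omega

def combine_schema_tokens_alt (tokens : List String) : List String := goB tokens 0

-- ===== PRECONDITION & SPEC =====
def Spec_combine_schema_tokens (tokens : List String) (out : List String) : Prop := out = combine_schema_tokens_alt tokens
instance (tokens : List String) (out : List String) : Decidable (Spec_combine_schema_tokens tokens out) := by unfold Spec_combine_schema_tokens; infer_instance

-- ===== CLAIM (what is proved, stated in full; the proofs are below) =====
def Claim_equal_combine_schema_tokens : Prop := ∀ (tokens : List String), Dom_combine_schema_tokens tokens → Spec_combine_schema_tokens tokens (combine_schema_tokens tokens)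

-- ===== LEMMAS AND PROOFS =====

-- join of the first k remaining tokens (the candidate phrase of window length k)
def JW (rem : List String) (k : Nat) : String := PySem.Str.join " " (rem.take k)

-- the largest window length ≤ n whose join is a schema phrase (0 = none): A's descending scan abstracted
def bigR (rem : List String) : Nat → Nat
  | 0 => 0
  | k + 1 => if k + 1 ≤ rem.length ∧ JW rem (k + 1) ∈ schema_phrases then k + 1 else bigR rem k

theorem bigR_le (rem : List String) : ∀ n, bigR rem n ≤ n := by
  intro n; induction n with
  | zero => simp [bigR]
  | succ n ih => simp only [bigR]; split <;> omega

-- ----- basic join facts -----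
theorem chars_join_snoc (sep : List Char) :
    ∀ (L : List (List Char)) (x : List Char), L ≠ [] →
      PySem.Chars.join sep (L ++ [x]) = PySem.Chars.join sep L ++ sep ++ x := by
  intro L
  induction L with
  | nil => intro x h; exact absurd rfl h
  | cons a L ih =>
    intro x _
    cases L with
    | nil => simp [PySem.Chars.join_cons_cons, PySem.Chars.join_singleton]
    | cons b L =>
      rw [List.cons_append, List.cons_append, PySem.Chars.join_cons_cons,
        show (b :: (L ++ [x])) = (b :: L) ++ [x] from rfl, ih x (by simp),
        PySem.Chars.join_cons_cons]
      simp [List.append_assoc]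

theorem join_snoc (l : List String) (x : String) (hl : l ≠ []) :
    PySem.Str.join " " (l ++ [x]) = PySem.Str.join " " l ++ " " ++ x := by
  apply String.toList_inj.mp
  rw [String.toList_append, String.toList_append, PySem.Str.toList_join, PySem.Str.toList_join,
    List.map_append]
  exact chars_join_snoc _ _ _ (by simpa using hl)

theorem join_single (x : String) : PySem.Str.join " " [x] = x := by
  apply String.toList_inj.mp
  rw [PySem.Str.toList_join]
  simp [PySem.Chars.join_singleton]

-- the char path of window k+1 extends the path of window k by exactly one inner-loop step
theorem JW_step (rem : List String) (k : Nat) (hk : k < rem.length) :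
    (JW rem (k + 1)).toList = (JW rem k).toList ++ stepChars k (rem.getD k "") := by
  have hget : rem.getD k "" = rem[k] := List.getD_eq_getElem _ _ hk
  have htake : rem.take (k + 1) = rem.take k ++ [rem[k]] := by
    rw [List.take_succ, List.getElem?_eq_getElem hk]
    rfl
  rcases Nat.eq_zero_or_pos k with h0 | hpos
  · subst h0
    simp [JW, htake, join_single, stepChars, PySem.Str.toList_join, PySem.Chars.join_nil, List.getElem?_eq_getElem hk]
  · have hne : rem.take k ≠ [] := by
      intro hn
      rcases List.take_eq_nil_iff.mp hn with h | h <;> simp_all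
    rw [JW, JW, htake, join_snoc _ _ hne]
    simp [String.toList_append, stepChars, Nat.pos_iff_ne_zero.mp hpos, List.getElem?_eq_getElem hk]

-- ----- trie facts -----
def hitT (st : Bool × Trie) (cs : List Char) : Bool := ((walkT st cs).map Prod.fst).getD false

theorem walkT_append (a b : List Char) : ∀ st, walkT st (a ++ b) = (walkT st a).bind (fun s => walkT s b) := by
  induction a with
  | nil => intro st; simp [walkT]
  | cons c cs ih =>
    intro st
    simp only [List.cons_append, walkT]
    cases findT st.2 c with
    | none => rfl
    | some st' => exact ih st'

theorem hitT_nil_trie (b : Bool) (cs : List Char) : hitT (b, Trie.nil) cs = (b && cs.isEmpty) := by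
  cases cs <;> simp [hitT, walkT, findT]

theorem hitT_nil_cs (b : Bool) (t : Trie) : hitT (b, t) [] = b := rfl

theorem hitT_node (b b' : Bool) (c' x : Char) (child sib : Trie) (xs : List Char) :
    hitT (b, Trie.node c' b' child sib) (x :: xs) =
      if c' = x then hitT (b', child) xs else hitT (b, sib) (x :: xs) := by
  by_cases hcx : c' = x <;> simp [hitT, walkT, findT, hcx]

theorem hitT_bool_irrel (b b2 : Bool) (ch : Trie) (x : Char) (xs : List Char) :
    hitT (b, ch) (x :: xs) = hitT (b2, ch) (x :: xs) := rfl

theorem hit_ins : ∀ (ch : Trie) (ys : List Char), ys ≠ [] → ∀ (b : Bool) (xs : List Char),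
    hitT (b, insT ch ys) xs = ((ys == xs) || hitT (b, ch) xs) := by
  intro ch ys
  induction ch, ys using insT.induct with
  | case1 ch => intro h; exact absurd rfl h
  | case2 c cs ih =>
    intro _ b xs
    simp only [insT]
    cases xs with
    | nil => simp [hitT_nil_cs]
    | cons x xs' =>
      rw [hitT_node]
      by_cases hcx : c = x
      · subst hcx
        rw [if_pos rfl]
        rcases List.eq_nil_or_concat' cs with hcs | _
        · subst hcs
          cases xs' <;> simp [insT, hitT_nil_trie, hitT_nil_cs]
        · have hcsne : cs ≠ [] := by rintro rfl; simp_all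
          rw [ih hcsne]
          have hie : cs.isEmpty = false := by simpa [List.isEmpty_iff] using hcsne
          rw [hie]
          simp [hitT_nil_trie]
      · rw [if_neg hcx]
        simp [hitT_nil_trie, hcx]
  | case3 b' child sib c cs hcs =>
    intro _ b xs
    have hcs' : cs = [] := List.isEmpty_iff.mp hcs
    subst hcs'
    simp only [insT, if_true, List.isEmpty_nil]
    cases xs with
    | nil => simp [hitT_nil_cs]
    | cons x xs' =>
      rw [hitT_node, hitT_node]
      by_cases hcx : c = x
      · subst hcx
        rw [if_pos rfl, if_pos rfl]
        cases xs' with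
        | nil => simp [hitT_nil_cs]
        | cons y ys' => rw [hitT_bool_irrel true b']; simp
      · rw [if_neg hcx, if_neg hcx]
        simp [hcx]
  | case4 b' child sib c cs hcs ih =>
    intro _ b xs
    have hcsne : cs ≠ [] := by simpa [List.isEmpty_iff] using hcs
    simp only [insT, if_true]
    rw [if_neg hcs]
    cases xs with
    | nil => simp [hitT_nil_cs]
    | cons x xs' =>
      rw [hitT_node, hitT_node]
      by_cases hcx : c = x
      · subst hcx
        rw [if_pos rfl, if_pos rfl, ih hcsne]
        by_cases h : cs = xs' <;> simp [h]
      · rw [if_neg hcx, if_neg hcx]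
        simp [hcx]
  | case5 c' b' child sib c cs hne ih =>
    intro hys b xs
    simp only [insT]
    rw [if_neg hne]
    cases xs with
    | nil => simp [hitT_nil_cs]
    | cons x xs' =>
      rw [hitT_node, hitT_node]
      by_cases hcx : c' = x
      · subst hcx
        rw [if_pos rfl, if_pos rfl]
        have : ¬ (c = c') := fun h => hne (h.symm)
        simp [this]
      · rw [if_neg hcx, if_neg hcx, ih hys]

theorem hit_foldl : ∀ (ps : List String) (t : Trie) (cs : List Char),
    (∀ p ∈ ps, p.toList ≠ []) →
    hitT (false, ps.foldl (fun t p => insT t p.toList) t) cs =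
      (ps.any (fun p => p.toList == cs) || hitT (false, t) cs) := by
  intro ps
  induction ps with
  | nil => simp
  | cons p ps ih =>
    intro t cs hne
    simp only [List.foldl_cons, List.any_cons]
    rw [ih _ _ (fun q hq => hne q (List.mem_cons_of_mem _ hq)),
        hit_ins t p.toList (hne p (List.mem_cons_self)) false cs]
    cases hb : (p.toList == cs) <;> cases hb2 : ps.any (fun p => p.toList == cs) <;> simp_all

theorem hit_build (cs : List Char) :
    hitT (false, buildTrie) cs = schema_phrases.any (fun p => p.toList == cs) := by
  rw [buildTrie, hit_foldl schema_phrases .nil cs (by decide)]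
  simp [hitT_nil_trie]

theorem hit_build_mem (s : String) :
    hitT (false, buildTrie) s.toList = decide (s ∈ schema_phrases) := by
  rw [hit_build]
  rcases h : schema_phrases.any (fun p => p.toList == s.toList) with _ | _
  · simp only [List.any_eq_false, beq_iff_eq] at h
    simp only [eq_comm (a := false), decide_eq_false_iff_not]
    intro hm
    exact h s hm rfl
  · simp only [List.any_eq_true, beq_iff_eq] at h
    obtain ⟨p, hp, hpe⟩ := h
    have : p = s := String.toList_inj.mp hpe
    subst this
    simp [hp]

-- a dead walk stays dead on any extension; a phrase hit needs a live walk
theorem JW_prefix (rem : List String) : ∀ m k, k ≤ m → m ≤ rem.length →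
    ∃ s, (JW rem m).toList = (JW rem k).toList ++ s := by
  intro m
  induction m with
  | zero => intro k h1 _; interval_cases k; exact ⟨[], by simp⟩
  | succ m ih =>
    intro k h1 h2
    rcases Nat.eq_or_lt_of_le h1 with h | h
    · exact ⟨[], by simp [h]⟩
    · obtain ⟨s, hs⟩ := ih k (by omega) (by omega)
      exact ⟨s ++ stepChars m (rem.getD m ""),
        by rw [JW_step rem m (by omega), hs, List.append_assoc]⟩

theorem walk_dead_no_hit (rem : List String) (k m : Nat) (hkm : k ≤ m) (hm : m ≤ rem.length)
    (hdead : walkT (false, buildTrie) (JW rem k).toList = none) :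
    ¬ JW rem m ∈ schema_phrases := by
  intro hmem
  have hhit : hitT (false, buildTrie) (JW rem m).toList = true := by
    rw [hit_build_mem]; simpa
  obtain ⟨s, hs⟩ := JW_prefix rem m k hkm hm
  rw [hitT, hs, walkT_append, hdead] at hhit
  simp at hhit

-- ----- A's scan equals bigR -----
theorem tryDesc_eq_bigR (tokens : List String) (i : Nat) : ∀ j,
    tryDesc tokens i j =
      (if bigR (tokens.drop i) j = 0 then none
       else some (JW (tokens.drop i) (bigR (tokens.drop i) j), bigR (tokens.drop i) j)) := by
  intro j
  induction j with
  | zero => simp [tryDesc, bigR]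
  | succ j ih =>
    have hslice : PySem.List.slice tokens (some (i : Int)) (some ((i : Int) + ((j : Int) + 1))) =
        (tokens.drop i).take (j + 1) := by
      have hc : (i : Int) + ((j : Int) + 1) = (i : Int) + (((j + 1 : Nat)) : Int) := by push_cast; ring
      rw [hc, PySem.List.slice_natCast_add]
    have hcond : (i + (j + 1) ≤ tokens.length) ↔ (j + 1 ≤ (tokens.drop i).length) := by
      simp; omega
    have hbig : bigR (tokens.drop i) (j + 1) =
        (if j + 1 ≤ (tokens.drop i).length ∧ JW (tokens.drop i) (j + 1) ∈ schema_phrases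
         then j + 1 else bigR (tokens.drop i) j) := rfl
    simp only [tryDesc, hslice]
    by_cases hle : i + (j + 1) ≤ tokens.length
    · rw [if_pos hle]
      by_cases hmem : JW (tokens.drop i) (j + 1) ∈ schema_phrases
      · have hgood : j + 1 ≤ (tokens.drop i).length ∧
            JW (tokens.drop i) (j + 1) ∈ schema_phrases := ⟨hcond.mp hle, hmem⟩
        rw [if_pos (show PySem.Str.join " " ((tokens.drop i).take (j + 1)) ∈ schema_phrases from hmem),
            hbig, if_pos hgood, if_neg (show ¬ j + 1 = 0 by omega)]
        rfl
      · have hbad : ¬ (j + 1 ≤ (tokens.drop i).length ∧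
            JW (tokens.drop i) (j + 1) ∈ schema_phrases) := fun hc => hmem hc.2
        rw [if_neg (show ¬ PySem.Str.join " " ((tokens.drop i).take (j + 1)) ∈ schema_phrases from hmem),
            ih, hbig, if_neg hbad]
    · have hbad : ¬ (j + 1 ≤ (tokens.drop i).length ∧
          JW (tokens.drop i) (j + 1) ∈ schema_phrases) := fun hc => hle (hcond.mpr hc.1)
      rw [if_neg hle, ih, hbig, if_neg hbad]

-- ----- B's scan equals bigR -----
theorem scanB_spec (rem : List String) : ∀ (d k : Nat) (st : Bool × Trie) (best : Nat),
    rem.length - k = d →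
    walkT (false, buildTrie) (JW rem k).toList = some st →
    scanB st (rem.drop k) k best =
      (List.range' (k + 1) d).foldl
        (fun b m => if m ≤ rem.length ∧ JW rem m ∈ schema_phrases then m else b) best := by
  intro d
  induction d with
  | zero =>
    intro k st best hd _
    rw [List.drop_of_length_le (by omega)]
    simp [scanB]
  | succ d ih =>
    intro k st best hd hwalk
    have hk : k < rem.length := by omega
    have hdrop : rem.drop k = rem.getD k "" :: rem.drop (k + 1) := by
      rw [List.getD_eq_getElem _ _ hk, List.drop_eq_getElem_cons hk]
    rw [hdrop]
    simp only [scanB]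
    have hw1 : walkT (false, buildTrie) (JW rem (k + 1)).toList =
        (walkT st (stepChars k (rem.getD k ""))) := by
      rw [JW_step rem k hk, walkT_append, hwalk]; rfl
    cases hw : walkT st (stepChars k (rem.getD k "")) with
    | none =>
      dsimp only
      have hdead : walkT (false, buildTrie) (JW rem (k + 1)).toList = none := by rw [hw1, hw]
      have hfail : ∀ m ∈ List.range' (k + 1) (d + 1),
          ¬ (m ≤ rem.length ∧ JW rem m ∈ schema_phrases) := by
        intro m hm hc
        have hm' := List.mem_range'_1.mp hm
        exact walk_dead_no_hit rem (k + 1) m (by omega) hc.1 hdead hc.2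
      clear ih
      generalize List.range' (k + 1) (d + 1) = l at hfail
      revert hfail
      induction l generalizing best with
      | nil => intro _; rfl
      | cons m l ihl =>
        intro hfail
        rw [List.foldl_cons, if_neg (hfail m List.mem_cons_self)]
        exact ihl _ (fun q hq => hfail q (List.mem_cons_of_mem _ hq))
    | some st' =>
      dsimp only
      rw [ih (k + 1) st' (if st'.1 then k + 1 else best) (by omega) (by rw [hw1, hw])]
      rw [List.range'_succ, List.foldl_cons]
      have hhit : st'.1 = decide (JW rem (k + 1) ∈ schema_phrases) := by
        rw [← hit_build_mem]
        simp only [hitT, hw1, hw, Option.map_some, Option.getD_some]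
      rw [hhit]
      by_cases hm : JW rem (k + 1) ∈ schema_phrases
      · simp [hm, show k + 1 ≤ rem.length by omega]
      · simp [hm]

theorem foldl_asc_eq_bigR (rem : List String) : ∀ n,
    (List.range' 1 n).foldl
        (fun b m => if m ≤ rem.length ∧ JW rem m ∈ schema_phrases then m else b) 0 = bigR rem n := by
  intro n
  induction n with
  | zero => simp [bigR]
  | succ n ih =>
    rw [List.range'_concat, List.foldl_append, ih]
    simp only [List.foldl_cons, List.foldl_nil, bigR]
    have : 1 + 1 * n = n + 1 := by omega
    rw [this]

-- every matching window has at most 4 tokens (a 5-window join has ≥ 4 spaces, phrases have ≤ 3)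
theorem JW_spaces (rem : List String) : ∀ m, m ≤ rem.length →
    m ≤ (JW rem m).toList.count ' ' + 1 := by
  intro m
  induction m with
  | zero => omega
  | succ m ih =>
    intro hm
    rw [JW_step rem m (by omega), List.count_append]
    rcases Nat.eq_zero_or_pos m with h0 | hpos
    · omega
    · have h1 : 1 ≤ (stepChars m (rem.getD m "")).count ' ' := by
        simp [stepChars, Nat.pos_iff_ne_zero.mp hpos]
      have := ih (by omega)
      omega

theorem cap4 (rem : List String) (m : Nat) (hm : m ≤ rem.length)
    (hmem : JW rem m ∈ schema_phrases) : m ≤ 4 := by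
  have h3 : ∀ p ∈ schema_phrases, p.toList.count ' ' ≤ 3 := by decide
  have := h3 _ hmem
  have := JW_spaces rem m hm
  omega

theorem bigR_eq_of_fail (rem : List String) : ∀ n m, m ≤ n →
    (∀ j, m < j → j ≤ n → ¬ (j ≤ rem.length ∧ JW rem j ∈ schema_phrases)) →
    bigR rem n = bigR rem m := by
  intro n
  induction n with
  | zero => intro m hm _; interval_cases m; rfl
  | succ n ih =>
    intro m hm hfail
    rcases Nat.eq_or_lt_of_le hm with h | h
    · rw [h]
    · rw [bigR, if_neg (hfail (n + 1) (by omega) (by omega))]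
      exact ih m (by omega) (fun j h1 h2 => hfail j h1 (by omega))

theorem bigR_five (rem : List String) : bigR rem rem.length = bigR rem 5 := by
  by_cases h : rem.length ≤ 5
  · exact (bigR_eq_of_fail rem 5 rem.length h (fun j h1 h2 hc => by omega)).symm
  · exact bigR_eq_of_fail rem rem.length 5 (by omega)
      (fun j h1 h2 hc => by have := cap4 rem j hc.1 hc.2; omega)

-- ----- assembling the two outer loops -----
theorem scanB_eq_bigR (tokens : List String) (i : Nat) :
    scanB (false, buildTrie) (tokens.drop i) 0 0 = bigR (tokens.drop i) 5 := by
  have h0 : walkT (false, buildTrie) (JW (tokens.drop i) 0).toList = some (false, buildTrie) := by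
    have : (JW (tokens.drop i) 0).toList = [] := by
      simp [JW, PySem.Str.toList_join, PySem.Chars.join_nil]
    rw [this]; rfl
  have hs := scanB_spec (tokens.drop i) (tokens.drop i).length 0 (false, buildTrie) 0 (by omega) h0
  rw [List.drop_zero] at hs
  rw [hs, show (0:Nat) + 1 = 1 from rfl, foldl_asc_eq_bigR, bigR_five]

theorem goA_eq_goB (tokens : List String) (i : Nat) : goA tokens i = goB tokens i := by
  suffices h : ∀ n i, tokens.length - i ≤ n → goA tokens i = goB tokens i from
    h (tokens.length - i) i (le_refl _)
  intro n
  induction n with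
  | zero =>
    intro i hn
    rw [goA, goB]
    have : ¬ i < tokens.length := by omega
    simp [this]
  | succ n ih =>
    intro i hn
    rw [goA, goB]
    by_cases hi : i < tokens.length
    · simp only [dif_pos hi, scanB_eq_bigR tokens i]
      cases hA : tryDesc tokens i 5 with
      | none =>
        have hz : bigR (tokens.drop i) 5 = 0 := by
          by_contra hz
          rw [tryDesc_eq_bigR, if_neg hz] at hA
          exact Option.some_ne_none _ hA
        simp only [hz]
        rw [dif_pos trivial]
        exact congrArg _ (ih (i + 1) (by omega))
      | some pj =>
        obtain ⟨p, j⟩ := pj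
        have hz : bigR (tokens.drop i) 5 ≠ 0 := by
          intro hz
          rw [tryDesc_eq_bigR, if_pos hz] at hA
          simp at hA
        rw [tryDesc_eq_bigR, if_neg hz] at hA
        cases Option.some.inj hA
        simp only [dif_neg hz]
        have hb5 : bigR (tokens.drop i) 5 ≤ 5 := bigR_le _ 5
        have hslice : PySem.List.slice tokens (some (i : Int))
            (some ((i : Int) + ((bigR (tokens.drop i) 5 : Nat) : Int))) =
            (tokens.drop i).take (bigR (tokens.drop i) 5) := PySem.List.slice_natCast_add ..
        rw [hslice]
        exact congrArg _ (ih (i + bigR (tokens.drop i) 5) (by omega))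
    · simp [hi]

-- ===== VERDICT (by name: the statement is the Claim_ definition above) =====
theorem combine_schema_tokens_spec : Claim_equal_combine_schema_tokens := by
  intro tokens _
  unfold Spec_combine_schema_tokens combine_schema_tokens combine_schema_tokens_alt
  exact goA_eq_goB tokens 0
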